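-- pv_equiv track=rewrite | github.com/shaby112/kuantra-app | backend/app/services/relationship_suggestor.py | _identify_primary_keys
-- ===== SOURCE A (Python) =====
-- from typing import Dict, Any, List, Optional, Set
--
-- def _identify_primary_keys(
--
--     tables: Dict[str, List[Dict[str, str]]]
-- ) -> Dict[str, str]:
--     """Identify primary key columns for each table."""
--     primary_keys = {}
--
--     for table_name, columns in tables.items():
--         # Look for 'id' column first
--         for col in columns:
--             if col["name"].lower() == "id":
--                 primary_keys[table_name] = col["name"]
--                 break
--
--         # If no 'id', look for tablename_id
--         if table_name not in primary_keys:
--             base_name = table_name.split(".")[-1]  # Remove schema prefix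
--             for col in columns:
--                 if col["name"].lower() == f"{base_name}_id":
--                     primary_keys[table_name] = col["name"]
--                     break
--
--     return primary_keys
-- ===== SOURCE B (Python) =====
-- def _identify_primary_keys(
--     tables
-- ):
--     """Identify primary key columns for each table (single pass per table)."""
--     primary_keys = {}
--     for table_name, columns in tables.items():
--         base_id = table_name.split(".")[-1] + "_id"
--         chosen = None
--         fallback = None
--         for col in columns:
--             low = col["name"].lower()
--             if low == "id":
--                 chosen = col["name"]
--                 break
--             if fallback is None and low == base_id:
--                 fallback = col["name"]
--         if chosen is None:
--             chosen = fallback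
--         if chosen is not None:
--             primary_keys[table_name] = chosen
--     return primary_keys
-- ===== Notes on version B (the rewrite author's own statement) =====
-- stated objective: simpler
-- what changed: Replaces A's two sequential scans per table (one for 'id', a second full scan for '<base>_id' guarded by a dict-membership test) with one single scan that breaks on 'id' and remembers the first '<base>_id' column as a fallback, inserting into the result only when a match exists.
import Mathlib
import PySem

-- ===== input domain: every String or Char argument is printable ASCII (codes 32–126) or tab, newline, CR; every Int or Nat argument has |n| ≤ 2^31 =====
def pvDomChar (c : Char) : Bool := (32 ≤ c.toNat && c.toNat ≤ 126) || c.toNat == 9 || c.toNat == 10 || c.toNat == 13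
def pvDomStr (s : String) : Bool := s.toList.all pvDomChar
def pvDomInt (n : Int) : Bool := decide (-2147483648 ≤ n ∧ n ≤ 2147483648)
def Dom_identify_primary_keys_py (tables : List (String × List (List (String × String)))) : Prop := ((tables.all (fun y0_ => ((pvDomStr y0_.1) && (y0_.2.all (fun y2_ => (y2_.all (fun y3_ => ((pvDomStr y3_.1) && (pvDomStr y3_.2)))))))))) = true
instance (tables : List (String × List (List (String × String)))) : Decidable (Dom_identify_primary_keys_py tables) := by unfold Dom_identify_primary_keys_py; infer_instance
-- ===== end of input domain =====

-- B replaces A's two sequential scans per table by one scan with a remembered fallback; objective: simpler.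

-- ===== PORT A =====
-- col["name"]; Pre_ guarantees the key is present (getD "" is never taken inside Pre_)
def pvColName (c : List (String × String)) : String :=
  ((PySem.Dict.mk c).get? "name").getD ""

-- A's first inner loop: 'for col in columns: if col["name"].lower() == "id": …; break'
def pvFindId : List (List (String × String)) → Option String
  | [] => none
  | c :: rest =>
    let n := pvColName c
    if PySem.Str.lower n == "id" then some n else pvFindId rest

-- A's second inner loop: same loop against f"{base_name}_id"
def pvFindBase (bid : String) : List (List (String × String)) → Option String
  | [] => none
  | c :: rest =>
    let n := pvColName c
    if PySem.Str.lower n == bid then some n else pvFindBase bid rest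

def identify_primary_keys_py (tables : List (String × List (List (String × String)))) : List (String × String) :=
  (tables.foldl (fun pk (p : String × List (List (String × String))) =>
    let pk1 := match pvFindId p.2 with
      | some n => pk.insert p.1 n
      | none => pk
    if pk1.contains p.1 then pk1
    else
      let base := PySem.List.pyGetD ((PySem.Str.split? p.1 ".").getD []) (-1) ""
      match pvFindBase (base ++ "_id") p.2 with
      | some n => pk1.insert p.1 n
      | none => pk1
  ) PySem.Dict.empty).items

-- ===== PORT B =====
-- B's single scan: break on 'id', remember the first base_id column as fallback
def pvScanCols (bid : String) : List (List (String × String)) → Option String → Option String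
  | [], fb => fb
  | c :: rest, fb =>
    let n := pvColName c
    let low := PySem.Str.lower n
    if low == "id" then some n
    else pvScanCols bid rest (if fb.isNone && low == bid then some n else fb)

def identify_primary_keys_py_alt (tables : List (String × List (List (String × String)))) : List (String × String) :=
  (tables.foldl (fun pk (p : String × List (List (String × String))) =>
    let bid := PySem.List.pyGetD ((PySem.Str.split? p.1 ".").getD []) (-1) "" ++ "_id"
    match pvScanCols bid p.2 none with
    | some n => pk.insert p.1 n
    | none => pk
  ) PySem.Dict.empty).items

-- ===== PRECONDITION & SPEC =====
-- Pre_ excludes (a) exactly the inputs where Python raises KeyError: a column dict missing the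
-- "name" key that is reached, i.e. not preceded by a column named 'id' (which makes both loops break);
-- (b) duplicate table names in the association list, which the Python dict input cannot represent.
def Pre_identify_primary_keys_py (tables : List (String × List (List (String × String)))) : Prop :=
  (tables.map Prod.fst).Nodup ∧
  ∀ p ∈ tables, ∀ i < p.2.length, (PySem.Dict.mk (p.2.getD i [])).contains "name" = false →
    ∃ j < i, ((PySem.Dict.mk (p.2.getD j [])).get? "name").map PySem.Str.lower = some "id"
instance (tables : List (String × List (List (String × String)))) : Decidable (Pre_identify_primary_keys_py tables) := by unfold Pre_identify_primary_keys_py; infer_instance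

def pvWitness_identify_primary_keys_py : (List (String × List (List (String × String)))) :=
  [("s.t", [[("name", "x")], [("name", "t_id")]]), ("u", [[("name", "ID")]])]

def Spec_identify_primary_keys_py (tables : List (String × List (List (String × String)))) (out : List (String × String)) : Prop := out = identify_primary_keys_py_alt tables
instance (tables : List (String × List (List (String × String)))) (out : List (String × String)) : Decidable (Spec_identify_primary_keys_py tables out) := by unfold Spec_identify_primary_keys_py; infer_instance

-- ===== CLAIM (what is proved, stated in full; the proofs are below) =====
def Claim_equal_identify_primary_keys_py : Prop := ∀ (tables : List (String × List (List (String × String)))), Dom_identify_primary_keys_py tables → Pre_identify_primary_keys_py tables → Spec_identify_primary_keys_py tables (identify_primary_keys_py tables)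

-- ===== LEMMAS AND PROOFS =====

-- B's single scan equals A's two scans: first match of 'id', else the fallback, else first match of bid.
theorem pvScan_eq (bid : String) (cols : List (List (String × String))) :
    ∀ fb, pvScanCols bid cols fb = (pvFindId cols).or (fb.or (pvFindBase bid cols)) := by
  induction cols with
  | nil => intro fb; simp [pvScanCols, pvFindId, pvFindBase]
  | cons c rest ih =>
    intro fb
    simp only [pvScanCols, pvFindId, pvFindBase]
    by_cases hid : (PySem.Str.lower (pvColName c) == "id") = true
    · simp [hid]
    · simp only [hid, if_false, Bool.false_eq_true, ih]
      cases fb with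
      | some x => simp
      | none =>
        by_cases hb : (PySem.Str.lower (pvColName c) == bid) = true
        · simp [hb]
        · simp [hb]

-- one table step: if the table name is not yet a key, A's step equals B's step
theorem pvStep_eq (pk : PySem.Dict String String) (tn : String)
    (cols : List (List (String × String))) (h : pk.contains tn = false) :
    (let pk1 := match pvFindId cols with
      | some n => pk.insert tn n
      | none => pk
     if pk1.contains tn then pk1
     else
       let base := PySem.List.pyGetD ((PySem.Str.split? tn ".").getD []) (-1) ""
       match pvFindBase (base ++ "_id") cols with
       | some n => pk1.insert tn n
       | none => pk1) =
    (let bid := PySem.List.pyGetD ((PySem.Str.split? tn ".").getD []) (-1) "" ++ "_id"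
     match pvScanCols bid cols none with
     | some n => pk.insert tn n
     | none => pk) := by
  simp only [pvScan_eq, Option.none_or]
  cases hfi : pvFindId cols with
  | some n => simp [PySem.Dict.contains_insert_self]
  | none =>
    simp only [h, Option.none_or]
    cases pvFindBase (PySem.List.pyGetD ((PySem.Str.split? tn ".").getD []) (-1) "" ++ "_id") cols <;> simp

-- the folds agree from any accumulator containing none of the remaining table names
theorem pvFold_eq (tables : List (String × List (List (String × String)))) :
    ∀ pk : PySem.Dict String String,
    (tables.map Prod.fst).Nodup →
    (∀ t ∈ tables.map Prod.fst, pk.contains t = false) →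
    tables.foldl (fun pk (p : String × List (List (String × String))) =>
      let pk1 := match pvFindId p.2 with
        | some n => pk.insert p.1 n
        | none => pk
      if pk1.contains p.1 then pk1
      else
        let base := PySem.List.pyGetD ((PySem.Str.split? p.1 ".").getD []) (-1) ""
        match pvFindBase (base ++ "_id") p.2 with
        | some n => pk1.insert p.1 n
        | none => pk1) pk =
    tables.foldl (fun pk (p : String × List (List (String × String))) =>
      let bid := PySem.List.pyGetD ((PySem.Str.split? p.1 ".").getD []) (-1) "" ++ "_id"
      match pvScanCols bid p.2 none with
      | some n => pk.insert p.1 n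
      | none => pk) pk := by
  induction tables with
  | nil => intro pk _ _; rfl
  | cons hd tl ih =>
    intro pk hnd hfresh
    simp only [List.foldl_cons]
    rw [pvStep_eq pk hd.1 hd.2 (hfresh hd.1 (by simp))]
    rw [List.map_cons, List.nodup_cons] at hnd
    apply ih
    · exact hnd.2
    · intro t ht
      have htne : t ≠ hd.1 := by
        intro he; exact hnd.1 (he ▸ ht)
      cases hsc : pvScanCols (PySem.List.pyGetD ((PySem.Str.split? hd.1 ".").getD []) (-1) "" ++ "_id") hd.2 none with
      | none => simp only [hsc]; exact hfresh t (by simp [ht])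
      | some n =>
        simp only [hsc]
        rw [PySem.Dict.contains_insert]
        simp [htne, hfresh t (by simp [ht])]

-- ===== VERDICT (by name: the statement is the Claim_ definition above) =====
theorem identify_primary_keys_py_spec : Claim_equal_identify_primary_keys_py := by
  intro tables _ hpre
  unfold Spec_identify_primary_keys_py identify_primary_keys_py identify_primary_keys_py_alt
  have := pvFold_eq tables PySem.Dict.empty hpre.1
    (fun t _ => PySem.Dict.contains_empty t)
  rw [this]
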